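-- pv_equiv track=rewrite | github.com/ksy990628/CodingTest | KBS/Divide and conquer/17829.py | pulling
-- ===== SOURCE A (Python) =====
-- def pulling(arr,n):
--     if n == 1:
--         return arr[0][0]
--
--     new_arr = [[]for _ in range(n//2)]
--
--     for i in range(0,n,2):
--         for j in range(0,n,2):
--             li = [arr[i][j],arr[i][j+1],arr[i+1][j],arr[i+1][j+1]]
--             li.sort()
--             # new_arr[i//2] 에 저장해줘야한다는 부분을 생각 못함
--             new_arr[i//2].append(li[2])
--     # 재귀형식으로 다시
--     return pulling(new_arr,n//2)
-- ===== SOURCE B (Python) =====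
-- def pulling(arr, n):
--     # Top-down quadrant divide and conquer on index offsets: the result for a
--     # 2^k block is the second-largest of its four quadrant results; no
--     # intermediate grids are ever built.
--     def solve(r, c, size):
--         if size == 1:
--             return arr[r][c]
--         h = size // 2
--         q = sorted([solve(r, c, h), solve(r, c + h, h),
--                     solve(r + h, c, h), solve(r + h, c + h, h)])
--         return q[2]
--     return solve(0, 0, n)
-- ===== Notes on version B (the rewrite author's own statement) =====
-- stated objective: alternative
-- what changed: Replaced A's bottom-up level-by-level rebuilding of ever-smaller grids with a top-down quadrant divide-and-conquer over index offsets into the original grid, never materializing any intermediate grid.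
import Mathlib
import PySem

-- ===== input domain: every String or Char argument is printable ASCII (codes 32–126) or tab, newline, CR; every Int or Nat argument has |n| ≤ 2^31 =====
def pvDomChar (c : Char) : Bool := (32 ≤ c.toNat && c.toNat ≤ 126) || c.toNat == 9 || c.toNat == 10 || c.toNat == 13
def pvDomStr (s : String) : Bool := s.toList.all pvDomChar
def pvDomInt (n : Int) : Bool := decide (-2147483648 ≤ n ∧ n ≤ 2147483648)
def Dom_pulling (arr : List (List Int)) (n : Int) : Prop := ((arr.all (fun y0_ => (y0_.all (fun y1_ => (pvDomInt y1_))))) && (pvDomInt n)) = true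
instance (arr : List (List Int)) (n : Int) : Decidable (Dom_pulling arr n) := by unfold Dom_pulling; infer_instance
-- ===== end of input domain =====

-- B replaces A's bottom-up level-by-level grid rebuilding with a top-down
-- quadrant divide-and-conquer over index offsets into the original grid
-- (objective: alternative). Neither implementation mutates the caller's list.

-- arr[i][j] (IndexError → default, unreachable inside Pre_)
def pvRowGet (arr : List (List Int)) (i j : Int) : Int :=
  PySem.List.pyGetD (PySem.List.pyGetD arr i []) j 0

-- sorted([arr[i][j], arr[i][j+1], arr[i+1][j], arr[i+1][j+1]])[2]
def pvBlock (arr : List (List Int)) (i j : Int) : Int :=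
  let li := [pvRowGet arr i j, pvRowGet arr i (j + 1),
             pvRowGet arr (i + 1) j, pvRowGet arr (i + 1) (j + 1)]
  PySem.List.pyGetD (PySem.List.sorted li (fun x => x) false) 2 0

-- ===== PORT A =====
-- A's recursion, with a fuel counter only to make the recursion well-founded in
-- Lean (inside Pre_ the fuel n.toNat + 1 is never exhausted).
def pullingGo : Nat → List (List Int) → Int → Int
  | 0, _, _ => 0
  | fuel + 1, arr, n =>
    if n = 1 then pvRowGet arr 0 0
    else
      let new0 : List (List Int) :=
        (PySem.List.pyRange 0 (PySem.Int.floordiv n 2) 1).map (fun _ => ([] : List Int))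
      let new_arr :=
        (PySem.List.pyRange 0 n 2).foldl (fun acc i =>
          (PySem.List.pyRange 0 n 2).foldl (fun acc2 j =>
            PySem.List.pySetD acc2 (PySem.Int.floordiv i 2)
              (PySem.List.pyGetD acc2 (PySem.Int.floordiv i 2) [] ++ [pvBlock arr i j]))
            acc) new0
      pullingGo fuel new_arr (PySem.Int.floordiv n 2)

def pulling (arr : List (List Int)) (n : Int) : Int :=
  pullingGo (n.toNat + 1) arr n

-- ===== PORT B =====
-- Source B's nested `solve(r, c, size)`: quadrant recursion on offsets; a fuel
-- counter makes it well-founded (inside Pre_ the fuel n.toNat + 1 suffices,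
-- since the depth is log2 n).
def pullingAltGo : Nat → List (List Int) → Int → Int → Int → Int
  | 0, _, _, _, _ => 0
  | fuel + 1, arr, r, c, size =>
    if size = 1 then pvRowGet arr r c
    else
      let h := PySem.Int.floordiv size 2
      let q := PySem.List.sorted
        [pullingAltGo fuel arr r c h, pullingAltGo fuel arr r (c + h) h,
         pullingAltGo fuel arr (r + h) c h, pullingAltGo fuel arr (r + h) (c + h) h]
        (fun x => x) false
      PySem.List.pyGetD q 2 0

def pulling_alt (arr : List (List Int)) (n : Int) : Int :=
  pullingAltGo (n.toNat + 1) arr 0 0 n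

-- ===== PRECONDITION & SPEC =====
-- Pre_ excludes exactly the inputs on which Python A raises or diverges: n must
-- be a positive power of two (otherwise the recursion reaches an odd or
-- non-positive n: IndexError, or infinite recursion for n ≤ 0) and the first n
-- rows must each provide n entries (otherwise IndexError).
def Pre_pulling (arr : List (List Int)) (n : Int) : Prop :=
  0 < n ∧ n.toNat = 2 ^ n.toNat.log2 ∧ n ≤ (arr.length : Int) ∧
    ∀ row ∈ arr.take n.toNat, n ≤ (row.length : Int)
instance (arr : List (List Int)) (n : Int) : Decidable (Pre_pulling arr n) := by
  unfold Pre_pulling; infer_instance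

def pvWitness_pulling : List (List Int) × Int := ([[5, 6], [7, 8]], 2)

def Spec_pulling (arr : List (List Int)) (n : Int) (out : Int) : Prop := out = pulling_alt arr n
instance (arr : List (List Int)) (n : Int) (out : Int) : Decidable (Spec_pulling arr n out) := by
  unfold Spec_pulling; infer_instance

-- ===== CLAIM (what is proved, stated in full; the proofs are below) =====
def Claim_equal_pulling : Prop := ∀ (arr : List (List Int)) (n : Int),
  Dom_pulling arr n → Pre_pulling arr n → Spec_pulling arr n (pulling arr n)

-- ===== LEMMAS AND PROOFS =====

-- fuel-free form of B's recursion, indexed by the exponent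
def solveP (arr : List (List Int)) : Nat → Int → Int → Int
  | 0, r, c => pvRowGet arr r c
  | k + 1, r, c =>
    PySem.List.pyGetD (PySem.List.sorted
      [solveP arr k r c, solveP arr k r (c + 2 ^ k),
       solveP arr k (r + 2 ^ k) c, solveP arr k (r + 2 ^ k) (c + 2 ^ k)]
      (fun x => x) false) 2 0

theorem pv_fd_two_mul (x : Int) : PySem.Int.floordiv (2 * x) 2 = x := by
  simp [PySem.Int.floordiv, Int.mul_fdiv_cancel_left]

theorem pv_pow_succ_cast (k : Nat) : ((2 : Int) ^ (k + 1)) = 2 * (((2 ^ k : Nat) : Int)) := by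
  push_cast; ring

-- B's fueled port computes solveP once the fuel exceeds the depth
theorem pv_alt_eq_solveP : ∀ (k fuel : Nat) (arr : List (List Int)) (r c : Int),
    k + 1 ≤ fuel → pullingAltGo fuel arr r c ((2 : Int) ^ k) = solveP arr k r c := by
  intro k
  induction k with
  | zero =>
    intro fuel arr r c hf
    obtain ⟨f, rfl⟩ := Nat.exists_eq_succ_of_ne_zero (by omega : fuel ≠ 0)
    simp [pullingAltGo, solveP]
  | succ k ih =>
    intro fuel arr r c hf
    obtain ⟨f, rfl⟩ := Nat.exists_eq_succ_of_ne_zero (by omega : fuel ≠ 0)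
    have hne : ((2 : Int) ^ (k + 1)) ≠ 1 := by
      have : (2 : Int) ≤ 2 ^ (k + 1) := le_self_pow₀ (by norm_num) (Nat.succ_ne_zero k)
      omega
    have hh : PySem.Int.floordiv ((2 : Int) ^ (k + 1)) 2 = (2 : Int) ^ k := by
      rw [pow_succ, mul_comm, pv_fd_two_mul]
    simp only [pullingAltGo, if_neg hne, hh]
    rw [ih f arr r c (by omega), ih f arr r (c + 2 ^ k) (by omega),
        ih f arr (r + 2 ^ k) c (by omega), ih f arr (r + 2 ^ k) (c + 2 ^ k) (by omega)]
    rfl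

theorem pv_pyRange_two (m : Nat) :
    PySem.List.pyRange 0 (2 * (m : Int)) 2 =
      (List.range m).map (fun k : Nat => (2 * (k : Int))) := by
  rw [PySem.List.pyRange_of_pos _ _ (by norm_num)]
  rcases Nat.eq_zero_or_pos m with h | h
  · simp [h]
  · have h2 : (0 : Int) < 2 * m := by positivity
    rw [if_pos h2]
    have hdiv : ((2 * (m : Int) - 0 + 2 - 1) / 2).toNat = m := by omega
    rw [hdiv]; simp only [zero_add]

theorem pv_set_getD_self (l : List (List Int)) (k : Nat) :
    l.set k (l.getD k []) = l := by
  by_cases hk : k < l.length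
  · rw [List.getD_eq_getElem l [] hk, List.set_getElem_self]
  · exact List.set_eq_of_length_le (by omega)

theorem pv_inner_collapse {β : Type} (g : β → Int) (js : List β) (k : Nat) :
    ∀ acc : List (List Int),
      js.foldl (fun acc2 j => acc2.set k (acc2.getD k [] ++ [g j])) acc =
        acc.set k (acc.getD k [] ++ js.map g) := by
  induction js with
  | nil =>
    intro acc
    simp only [List.foldl_nil, List.map_nil, List.append_nil]
    exact (pv_set_getD_self acc k).symm
  | cons j js ih =>
    intro acc
    simp only [List.foldl_cons, List.map_cons]
    rw [ih]
    by_cases hk : k < acc.length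
    · have hget : (acc.set k (acc.getD k [] ++ [g j])).getD k [] = acc.getD k [] ++ [g j] := by
        rw [List.getD_eq_getElem?_getD, List.getElem?_set_self (by omega)]; rfl
      rw [hget, List.set_set, List.append_assoc]; rfl
    · have hid : ∀ v : List Int, acc.set k v = acc :=
        fun v => List.set_eq_of_length_le (by omega)
      rw [hid, hid, hid]

theorem pv_outer_aux (row : Nat → List Int) :
    ∀ (r p : Nat) (done : List (List Int)), done.length = p →
      (List.range' p r).foldl (fun acc t => acc.set t (acc.getD t [] ++ row t))
          (done ++ List.replicate r []) =
        done ++ (List.range' p r).map row := by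
  intro r
  induction r with
  | zero => intro p done _; simp
  | succ r ih =>
    intro p done hp
    rw [List.range'_succ]
    simp only [List.replicate_succ, List.foldl_cons, List.map_cons]
    have hget : (done ++ ([] : List Int) :: List.replicate r []).getD p [] = [] := by
      rw [List.getD_eq_getElem?_getD, ← hp, List.getElem?_append_right (le_refl _)]
      simp
    have hset : (done ++ ([] : List Int) :: List.replicate r []).set p (row p) =
        (done ++ [row p]) ++ List.replicate r [] := by
      rw [← hp, List.set_append_right _ _ (le_refl _)]
      simp
    rw [hget, List.nil_append, hset, ih (p + 1) (done ++ [row p]) (by simp [hp])]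
    simp

-- the half-size grid built by one step of A, in closed map form
def pvGrid (arr : List (List Int)) (m : Nat) : List (List Int) :=
  (List.range m).map (fun a : Nat =>
    (List.range m).map (fun b : Nat => pvBlock arr (2 * (a : Int)) (2 * (b : Int))))

theorem pv_grid_eq0 (arr : List (List Int)) (m : Nat) :
    ((PySem.List.pyRange 0 (2 * (m : Int)) 2).foldl (fun acc i =>
        (PySem.List.pyRange 0 (2 * (m : Int)) 2).foldl (fun acc2 j =>
          PySem.List.pySetD acc2 (PySem.Int.floordiv i 2)
            (PySem.List.pyGetD acc2 (PySem.Int.floordiv i 2) [] ++ [pvBlock arr i j]))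
          acc)
      ((PySem.List.pyRange 0 (PySem.Int.floordiv (2 * (m : Int)) 2) 1).map
        (fun _ => ([] : List Int)))) =
    (PySem.List.pyRange 0 (2 * (m : Int)) 2).map (fun i =>
      (PySem.List.pyRange 0 (2 * (m : Int)) 2).map (fun j => pvBlock arr i j)) := by
  have hinit : ((PySem.List.pyRange 0 (PySem.Int.floordiv (2 * (m : Int)) 2) 1).map
      (fun _ => ([] : List Int))) = List.replicate m [] := by
    rw [pv_fd_two_mul, PySem.List.pyRange_one]
    simp [Function.comp_def, List.map_const', Int.toNat_natCast]
  rw [hinit, pv_pyRange_two]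
  simp only [List.foldl_map, List.map_map, Function.comp_def, pv_fd_two_mul,
    PySem.List.pySetD_natCast, PySem.List.pyGetD_natCast]
  have hfun : (fun (acc : List (List Int)) (k : Nat) =>
      (List.range m).foldl (fun acc2 t =>
        acc2.set k (acc2.getD k [] ++ [pvBlock arr (2 * (k : Int)) (2 * (t : Int))])) acc) =
      (fun acc k => acc.set k
        (acc.getD k [] ++ (List.range m).map (fun t : Nat => pvBlock arr (2 * (k : Int)) (2 * (t : Int))))) := by
    funext acc k
    exact pv_inner_collapse (fun t : Nat => pvBlock arr (2 * (k : Int)) (2 * (t : Int))) _ k acc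
  rw [hfun, List.range_eq_range']
  have := pv_outer_aux
    (fun k => (List.range' 0 m).map (fun t : Nat => pvBlock arr (2 * (k : Int)) (2 * (t : Int))))
    m 0 [] rfl
  simpa using this

theorem pv_grid_closed (arr : List (List Int)) (m : Nat) :
    (PySem.List.pyRange 0 (2 * (m : Int)) 2).map (fun i =>
      (PySem.List.pyRange 0 (2 * (m : Int)) 2).map (fun j => pvBlock arr i j)) =
      pvGrid arr m := by
  rw [pv_pyRange_two]
  unfold pvGrid
  simp [List.map_map, Function.comp_def]

theorem pv_grid_get (arr : List (List Int)) (m r c : Nat) (hr : r < m) (hc : c < m) :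
    pvRowGet (pvGrid arr m) r c = pvBlock arr (2 * (r : Int)) (2 * (c : Int)) := by
  unfold pvRowGet pvGrid
  simp [PySem.List.pyGetD_natCast, List.getD_eq_getElem?_getD, hr, hc]


-- divide-and-conquer on the reduced grid = one level deeper on the original
theorem pv_solveP_grid (arr : List (List Int)) (m : Nat) :
    ∀ (k : Nat) (r c : Nat), r + 2 ^ k ≤ m → c + 2 ^ k ≤ m →
      solveP (pvGrid arr m) k r c = solveP arr (k + 1) (2 * (r : Int)) (2 * (c : Int)) := by
  intro k
  induction k with
  | zero =>
    intro r c hr hc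
    simp only [solveP, pow_zero]
    rw [pv_grid_get arr m r c (by omega) (by omega)]
    unfold pvBlock
    norm_num
  | succ k ih =>
    intro r c hr hc
    have hp : (0:Nat) < 2 ^ k := Nat.two_pow_pos k
    have e1 : ((r : Int) + 2 ^ k) = ((r + 2 ^ k : Nat) : Int) := by push_cast; ring
    have e2 : ((c : Int) + 2 ^ k) = ((c + 2 ^ k : Nat) : Int) := by push_cast; ring
    simp only [solveP, e1, e2]
    rw [ih r c (by omega) (by omega),
        ih r (c + 2 ^ k) (by omega) (by omega),
        ih (r + 2 ^ k) c (by omega) (by omega),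
        ih (r + 2 ^ k) (c + 2 ^ k) (by omega) (by omega)]
    have f1 : (2 * ((c + 2 ^ k : Nat) : Int)) = 2 * (c : Int) + 2 ^ (k + 1) := by
      push_cast; ring
    have f2 : (2 * ((r + 2 ^ k : Nat) : Int)) = 2 * (r : Int) + 2 ^ (k + 1) := by
      push_cast; ring
    simp only [solveP, f1, f2]

-- A's fueled recursion computes solveP 0 0 once the fuel exceeds the depth
theorem pv_main : ∀ (k fuel : Nat) (arr : List (List Int)),
    k + 1 ≤ fuel → pullingGo fuel arr ((2 : Int) ^ k) = solveP arr k 0 0 := by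
  intro k
  induction k with
  | zero =>
    intro fuel arr hf
    obtain ⟨f, rfl⟩ := Nat.exists_eq_succ_of_ne_zero (by omega : fuel ≠ 0)
    simp [pullingGo, solveP]
  | succ k ih =>
    intro fuel arr hf
    obtain ⟨f, rfl⟩ := Nat.exists_eq_succ_of_ne_zero (by omega : fuel ≠ 0)
    have hne : ((2 : Int) ^ (k + 1)) ≠ 1 := by
      have : (2 : Int) ≤ 2 ^ (k + 1) := le_self_pow₀ (by norm_num) (Nat.succ_ne_zero k)
      omega
    simp only [pullingGo, if_neg hne]
    rw [pv_pow_succ_cast k, pv_grid_eq0 arr (2 ^ k), pv_grid_closed arr (2 ^ k), pv_fd_two_mul]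
    have hc2 : (((2 ^ k : Nat) : Nat) : Int) = (2 : Int) ^ k := by push_cast; ring
    rw [hc2, ih f (pvGrid arr (2 ^ k)) (by omega)]
    have := pv_solveP_grid arr (2 ^ k) k 0 0 (by omega) (by omega)
    simpa using this

-- ===== VERDICT (by name: the statement is the Claim_ definition above) =====
theorem pulling_spec : Claim_equal_pulling := by
  intro arr n _ hpre
  obtain ⟨hpos, hpow, -, -⟩ := hpre
  obtain ⟨k, hn⟩ : ∃ k : Nat, n = (2 : Int) ^ k := by
    refine ⟨n.toNat.log2, ?_⟩
    calc n = ((n.toNat : Int)) := (Int.toNat_of_nonneg (by omega)).symm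
      _ = (((2 ^ n.toNat.log2 : Nat) : Int)) := congrArg (fun m : Nat => (m : Int)) hpow
      _ = (2 : Int) ^ n.toNat.log2 := by push_cast; ring
  subst hn
  have hk : k + 1 ≤ ((2 : Int) ^ k).toNat + 1 := by
    have h1 : (2 : Int) ^ k = ((2 ^ k : Nat) : Int) := by push_cast; ring
    have h2 : k < 2 ^ k := Nat.lt_two_pow_self
    rw [h1, Int.toNat_natCast]
    omega
  unfold Spec_pulling pulling pulling_alt
  rw [pv_main k _ arr hk, pv_alt_eq_solveP k _ arr 0 0 hk]
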